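-- pv_equiv track=rewrite | github.com/balhaddad-sys/shifu-ocr | shifu_ocr/mind/simulation.py | scale_grid
-- ===== SOURCE A (Python) =====
-- from typing import List, Dict, Tuple, Optional, Any, Set, Callable
--
-- Grid = List[List[int]]
--
-- def grid_shape(g: Grid) -> Tuple[int, int]:
--     rows = len(g)
--     cols = len(g[0]) if rows > 0 else 0
--     return (rows, cols)
--
-- def scale_grid(g: Grid, factor: int) -> Grid:
--     """Scale grid by integer factor (each cell becomes factor x factor block)."""
--     rows, cols = grid_shape(g)
--     out: Grid = [[0] * (cols * factor) for _ in range(rows * factor)]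
--     for r in range(rows):
--         for c in range(cols):
--             val = g[r][c]
--             for dr in range(factor):
--                 for dc in range(factor):
--                     out[r * factor + dr][c * factor + dc] = val
--     return out
-- ===== SOURCE B (Python) =====
-- def scale_grid(g, factor):
--     """Scale grid by integer factor (each cell becomes factor x factor block)."""
--     cols = len(g[0]) if g else 0
--     out = []
--     for row in g:
--         exp = [v for v in row[:cols] for _ in range(factor)]
--         for _ in range(factor):
--             out.append(list(exp))
--     return out
-- ===== Notes on version B (the rewrite author's own statement) =====
-- stated objective: simpler
-- what changed: B replaces A's preallocated zero grid plus four nested index-writing loops with direct assembly: expand each input row once and append factor fresh copies of it, row-block by row-block.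
import Mathlib
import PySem

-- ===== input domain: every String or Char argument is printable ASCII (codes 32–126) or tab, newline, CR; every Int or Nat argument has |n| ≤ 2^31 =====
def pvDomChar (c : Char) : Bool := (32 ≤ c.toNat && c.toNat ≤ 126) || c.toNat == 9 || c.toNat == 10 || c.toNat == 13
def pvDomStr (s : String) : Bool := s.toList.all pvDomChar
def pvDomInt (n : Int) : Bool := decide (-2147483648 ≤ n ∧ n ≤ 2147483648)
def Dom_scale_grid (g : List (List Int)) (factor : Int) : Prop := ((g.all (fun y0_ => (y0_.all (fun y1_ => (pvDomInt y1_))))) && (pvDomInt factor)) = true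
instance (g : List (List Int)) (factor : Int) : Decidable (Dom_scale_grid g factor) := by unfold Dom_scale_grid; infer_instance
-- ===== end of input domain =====

-- B replaces A's preallocated grid + nested index-writing loops by direct row-block assembly (objective: simpler).

-- ===== PORT A =====
-- grid_shape(g): (rows, cols)
def grid_shape (g : List (List Int)) : Int × Int :=
  let rows : Int := g.length
  let cols : Int := if rows > 0 then ((PySem.List.pyGetD g 0 []).length : Int) else 0
  (rows, cols)

-- literal port of A: preallocate rows*factor × cols*factor zero grid, then the four
-- nested loops writing out[r*factor+dr][c*factor+dc] = g[r][c].
-- pyGetD/pySetD are the total forms of g[r][c] / out[i][j] = v; indices are in range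
-- on every input admitted by Pre_scale_grid (writes are in range unconditionally).
def scale_grid (g : List (List Int)) (factor : Int) : List (List Int) :=
  let rc := grid_shape g
  let rows := rc.1
  let cols := rc.2
  let out : List (List Int) :=
    (PySem.List.pyRange 0 (rows * factor) 1).map (fun _ =>
      (PySem.List.pyRange 0 (cols * factor) 1).map (fun _ => (0 : Int)))
  (PySem.List.pyRange 0 rows 1).foldl (fun out r =>
    (PySem.List.pyRange 0 cols 1).foldl (fun out c =>
      let val := PySem.List.pyGetD (PySem.List.pyGetD g r []) c 0
      (PySem.List.pyRange 0 factor 1).foldl (fun out dr =>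
        (PySem.List.pyRange 0 factor 1).foldl (fun out dc =>
          PySem.List.pySetD out (r * factor + dr)
            (PySem.List.pySetD (PySem.List.pyGetD out (r * factor + dr) [])
              (c * factor + dc) val)) out) out) out) out

-- ===== PORT B =====
-- literal port of Source B: cols from the first row, then for each row build the expanded
-- row once and append factor copies of it.
def scale_grid_alt (g : List (List Int)) (factor : Int) : List (List Int) :=
  let cols : Int := if g ≠ [] then ((PySem.List.pyGetD g 0 []).length : Int) else 0
  g.foldl (fun out row =>
    let exp : List Int :=
      (PySem.List.slice row none (some cols)).flatMap (fun v =>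
        (PySem.List.pyRange 0 factor 1).map (fun _ => v))
    out ++ (PySem.List.pyRange 0 factor 1).map (fun _ => exp)) []

-- ===== PRECONDITION & SPEC =====
-- Pre_ excludes exactly the grids on which A raises IndexError: those with some row
-- shorter than the first row (g[r][c] is read for every c < len(g[0])).
def Pre_scale_grid (g : List (List Int)) (factor : Int) : Prop :=
  ∀ row ∈ g, g.headI.length ≤ row.length
instance (g : List (List Int)) (factor : Int) : Decidable (Pre_scale_grid g factor) := by
  unfold Pre_scale_grid; infer_instance
def pvWitness_scale_grid : List (List Int) × Int := ([[1, 2], [3, 4]], 2)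

def Spec_scale_grid (g : List (List Int)) (factor : Int) (out : List (List Int)) : Prop := out = scale_grid_alt g factor
instance (g : List (List Int)) (factor : Int) (out : List (List Int)) : Decidable (Spec_scale_grid g factor out) := by unfold Spec_scale_grid; infer_instance

-- ===== CLAIM (what is proved, stated in full; the proofs are below) =====
def Claim_equal_scale_grid : Prop := ∀ (g : List (List Int)) (factor : Int), Dom_scale_grid g factor → Pre_scale_grid g factor → Spec_scale_grid g factor (scale_grid g factor)


-- ===== LEMMAS AND PROOFS =====

-- expansion of one row: each value repeated f times
def pvExp (f : Nat) (row : List Int) : List Int := row.flatMap (fun v => List.replicate f v)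

theorem pv_len_flatMap_repl {α : Type} (f : Nat) (h : α → List Int) :
    ∀ (l : List α), (l.flatMap (fun x => List.replicate f (h x))).length = l.length * f := by
  intro l
  induction l with
  | nil => simp
  | cons a t ih => simp [ih, Nat.succ_mul, Nat.add_comm]

theorem pv_len_exp (f : Nat) (l : List Int) : (pvExp f l).length = l.length * f := by
  simpa [pvExp] using pv_len_flatMap_repl f (fun v : Int => v) l

theorem pv_fold_len {α : Type} (L : List α) (step : List (List Int) → α → List (List Int))
    (h : ∀ s x, (step s x).length = s.length) :
    ∀ mid, (L.foldl step mid).length = mid.length := by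
  induction L with
  | nil => intro mid; rfl
  | cons a t ih => intro mid; rw [List.foldl_cons, ih, h]

-- frame rule: a fold whose steps only touch the middle section
theorem pv_foldl_frame {α : Type} (L : List α)
    (F G : List (List Int) → α → List (List Int))
    (pre rest : List (List Int)) (m : Nat)
    (hG : ∀ mid x, x ∈ L → mid.length = m → (G mid x).length = m)
    (h : ∀ mid x, x ∈ L → mid.length = m →
      F (pre ++ (mid ++ rest)) x = pre ++ (G mid x ++ rest)) :
    ∀ mid, mid.length = m → L.foldl F (pre ++ (mid ++ rest)) = pre ++ (L.foldl G mid ++ rest) := by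
  induction L with
  | nil => intro mid _; rfl
  | cons a t ih =>
      intro mid hm
      rw [List.foldl_cons, h mid a (by simp) hm, List.foldl_cons]
      exact ih (fun mid x hx => hG mid x (by simp [hx]))
        (fun mid x hx => h mid x (by simp [hx])) _ (hG mid a (by simp) hm)

-- the single write out[i][j] = v, framed
theorem pv_set_frame (pre mid rest : List (List Int)) (dr j : Nat) (v : Int)
    (h : dr < mid.length) :
    (pre ++ (mid ++ rest)).set (pre.length + dr)
      (((pre ++ (mid ++ rest)).getD (pre.length + dr) []).set j v)
    = pre ++ (mid.set dr ((mid.getD dr []).set j v) ++ rest) := by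
  have h1 : (pre ++ (mid ++ rest)).getD (pre.length + dr) [] = mid.getD dr [] := by
    rw [List.getD_eq_getElem?_getD, List.getD_eq_getElem?_getD,
        List.getElem?_append_right (by omega), Nat.add_sub_cancel_left,
        List.getElem?_append_left h]
  rw [h1, List.set_append_right _ _ (by omega), Nat.add_sub_cancel_left,
      List.set_append_left _ _ h]

-- collapse the dc-loop: repeated writes to one fixed row
theorem pv_set_row_collapse {α : Type} (js : List α) (i : Nat)
    (step : List Int → α → List Int) :
    ∀ (out : List (List Int)), i < out.length →
      js.foldl (fun out j => out.set i (step (out.getD i []) j)) out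
      = out.set i (js.foldl step (out.getD i [])) := by
  induction js with
  | nil =>
      intro out hi
      simp [List.getD_eq_getElem?_getD, List.getElem?_eq_getElem hi]
  | cons a t ih =>
      intro out hi
      rw [List.foldl_cons, ih _ (by simpa using hi), List.foldl_cons]
      have hget : (out.set i (step (out.getD i []) a)).getD i [] = step (out.getD i []) a := by
        rw [List.getD_eq_getElem?_getD, List.getElem?_set_self' ]
        simp [List.getElem?_eq_getElem hi]
      rw [hget, List.set_set]

-- the dr-loop applies the same per-row transform to rows 0..k-1
theorem pv_dr_fold {α : Type} (js : List α) (W : List Int → α → List Int) :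
    ∀ (k : Nat) (mid : List (List Int)), k ≤ mid.length →
      (List.range k).foldl
        (fun mid dr => js.foldl (fun mid j => mid.set dr (W (mid.getD dr []) j)) mid) mid
      = (mid.take k).map (fun row => js.foldl W row) ++ mid.drop k := by
  intro k
  induction k with
  | zero => intro mid _; simp
  | succ k ih =>
      intro mid hk
      rw [List.range_succ, List.foldl_append, ih mid (by omega), List.foldl_cons, List.foldl_nil]
      have hk' : k < mid.length := by omega
      have hlenmap : ((mid.take k).map (fun row => js.foldl W row)).length = k := by
        simp [List.length_take, Nat.min_eq_left (le_of_lt hk')]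
      have hgd : (((mid.take k).map (fun row => js.foldl W row)) ++ mid.drop k).getD k []
          = mid.getD k [] := by
        rw [List.getD_eq_getElem?_getD, List.getElem?_append_right (by omega), hlenmap,
            Nat.sub_self, List.getD_eq_getElem?_getD]
        rw [List.getElem?_drop, Nat.add_zero]
      rw [pv_set_row_collapse js k _ _ (by simp; omega), hgd,
          List.set_append_right _ _ (by omega), hlenmap, Nat.sub_self]
      have hdrop : mid.drop k = mid[k] :: mid.drop (k + 1) := List.drop_eq_getElem_cons hk'
      have hgd2 : mid.getD k [] = mid[k] := by
        rw [List.getD_eq_getElem?_getD, List.getElem?_eq_getElem hk']; rfl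
      rw [hdrop, List.set_cons_zero]
      have hgd2' : mid.getD k [] = mid[k] := by
        rw [List.getD_eq_getElem?_getD, List.getElem?_eq_getElem hk']; rfl
      rw [hgd2']
      have htk : List.take (k+1) mid = List.take k mid ++ [mid[k]] := by
        rw [List.take_succ, List.getElem?_eq_getElem hk']
        rfl
      rw [htk, List.map_append, List.append_assoc]
      rfl

-- a fold whose step maps 'replicate f r' to 'replicate f (t r c)'
theorem pv_repl_fold {α : Type} (f : Nat)
    (step : List (List Int) → α → List (List Int)) (t : List Int → α → List Int) :
    ∀ (L : List α),
      (∀ (r : List Int) c, c ∈ L → step (List.replicate f r) c = List.replicate f (t r c)) →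
      ∀ r0, L.foldl step (List.replicate f r0) = List.replicate f (L.foldl t r0) := by
  intro L
  induction L with
  | nil => intro _ r0; rfl
  | cons a tl ih =>
      intro h r0
      rw [List.foldl_cons, h r0 a (by simp), List.foldl_cons]
      exact ih (fun r c hc => h r c (by simp [hc])) _

-- the dc-writes on a single row: fill f cells after 'pre' with v
theorem pv_rowfill (f : Nat) (v : Int) (cf : Nat) :
    ∀ (k m : Nat) (pre : List Int), pre.length = cf → k ≤ m →
      (List.range k).foldl (fun row dc => row.set (cf + dc) v)
        (pre ++ List.replicate m (0 : Int))
      = pre ++ (List.replicate k v ++ List.replicate (m - k) 0) := by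
  intro k
  induction k with
  | zero => intro m pre _ _; simp
  | succ k ih =>
      intro m pre hpre hk
      rw [List.range_succ, List.foldl_append, ih m pre hpre (by omega), List.foldl_cons,
          List.foldl_nil]
      have h1 : (pre ++ (List.replicate k v ++ List.replicate (m - k) (0:Int))).set (cf + k) v
          = pre ++ ((List.replicate k v ++ List.replicate (m - k) (0:Int)).set k v) := by
        rw [List.set_append_right _ _ (by omega), hpre, Nat.add_sub_cancel_left]
      rw [h1, List.set_append_right _ _ (by simp), List.length_replicate, Nat.sub_self]
      have hmk : m - k = (m - (k + 1)) + 1 := by omega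
      rw [hmk, List.replicate_succ, List.set_cons_zero]
      have : List.replicate (k+1) v = List.replicate k v ++ [v] := List.replicate_succ'
      rw [this]
      simp

-- the c-loop on a single row turns the zero row into the expansion of rowg
theorem pv_c_fold (f c0 : Nat) (rowg : List Int) (hlen : c0 ≤ rowg.length) :
    ∀ (k : Nat), k ≤ c0 →
      (List.range k).foldl
        (fun row c => (List.range f).foldl
          (fun row dc => row.set (c * f + dc) (rowg.getD c 0)) row)
        (List.replicate (c0 * f) 0)
      = pvExp f (rowg.take k) ++ List.replicate ((c0 - k) * f) 0 := by
  intro k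
  induction k with
  | zero => intro _; simp [pvExp]
  | succ k ih =>
      intro hk
      rw [List.range_succ, List.foldl_append, ih (by omega), List.foldl_cons, List.foldl_nil]
      have hprelen : (pvExp f (rowg.take k)).length = k * f := by
        rw [pv_len_exp, List.length_take, Nat.min_eq_left (by omega)]
      have hsplit : (c0 - k) * f = f + ((c0 - (k+1)) * f) := by
        have : c0 - k = 1 + (c0 - (k+1)) := by omega
        rw [this, Nat.add_mul, Nat.one_mul]
      rw [pv_rowfill f (rowg.getD k 0) (k * f) f ((c0 - k) * f) _ hprelen
            (by rw [hsplit]; omega)]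
      have htake : rowg.take (k+1) = rowg.take k ++ [rowg.getD k 0] := by
        have hk' : k < rowg.length := by omega
        rw [List.take_succ, List.getElem?_eq_getElem hk']
        simp [List.getD_eq_getElem?_getD, List.getElem?_eq_getElem hk']
      rw [htake]
      have hexp : pvExp f (rowg.take k ++ [rowg.getD k 0])
          = pvExp f (rowg.take k) ++ List.replicate f (rowg.getD k 0) := by
        simp [pvExp]
      rw [hexp]
      have : (c0 - k) * f - f = (c0 - (k+1)) * f := by omega
      rw [this, List.append_assoc]

-- one whole grid-row step of A, on the framed middle block
theorem pv_block (f c0 : Nat) (rowg : List Int) (hlen : c0 ≤ rowg.length)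
    (pre rest : List (List Int)) (cf : Nat) (hpre : pre.length = cf) :
    (List.range c0).foldl
      (fun out c => (List.range f).foldl
        (fun out dr => (List.range f).foldl
          (fun out dc => out.set (cf + dr)
            ((out.getD (cf + dr) []).set (c * f + dc) (rowg.getD c 0))) out) out)
      (pre ++ (List.replicate f (List.replicate (c0 * f) 0) ++ rest))
    = pre ++ (List.replicate f (pvExp f (rowg.take c0)) ++ rest) := by
  subst hpre
  have hsetlen : ∀ (s : List (List Int)) (dr j : Nat) (v : Int),
      (s.set dr ((s.getD dr []).set j v)).length = s.length := by
    intro s dr j v; simp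
  have hGlen : ∀ (mid : List (List Int)) (c : Nat),
      ((List.range f).foldl (fun mid dr =>
        (List.range f).foldl (fun mid dc =>
          mid.set dr ((mid.getD dr []).set (c * f + dc) (rowg.getD c 0))) mid) mid).length
      = mid.length := by
    intro mid c
    exact pv_fold_len _ _ (fun s dr =>
      pv_fold_len _ _ (fun s' dc => hsetlen s' dr _ _) s) mid
  rw [pv_foldl_frame (List.range c0) _
        (fun mid c => (List.range f).foldl (fun mid dr =>
          (List.range f).foldl (fun mid dc =>
            mid.set dr ((mid.getD dr []).set (c * f + dc) (rowg.getD c 0))) mid) mid)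
        pre rest f
        (fun mid c _ hm => by rw [hGlen]; exact hm)
        (fun mid c _ hm => by
          exact pv_foldl_frame (List.range f) _
            (fun mid dr => (List.range f).foldl (fun mid dc =>
              mid.set dr ((mid.getD dr []).set (c * f + dc) (rowg.getD c 0))) mid)
            pre rest f
            (fun mid2 dr _ hm2 => by
              rw [pv_fold_len _ _ (fun s' dc => hsetlen s' dr _ _) mid2]; exact hm2)
            (fun mid2 dr hdr hm2 => by
              exact pv_foldl_frame (List.range f) _
                (fun mid dc => mid.set dr ((mid.getD dr []).set (c * f + dc) (rowg.getD c 0)))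
                pre rest f
                (fun mid3 dc _ hm3 => by rw [hsetlen]; exact hm3)
                (fun mid3 dc _ hm3 =>
                  pv_set_frame pre mid3 rest dr (c * f + dc) (rowg.getD c 0)
                    (by rw [hm3]; exact List.mem_range.mp hdr))
                mid2 hm2)
            mid hm)
        _ (by simp)]
  congr 1
  congr 1
  rw [pv_repl_fold f _
        (fun r c => (List.range f).foldl
          (fun row dc => row.set (c * f + dc) (rowg.getD c 0)) r)
        (List.range c0)
        (fun r c _ => by
          rw [pv_dr_fold (List.range f)
                (fun row dc => row.set (c * f + dc) (rowg.getD c 0)) f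
                (List.replicate f r) (by simp)]
          simp)
        (List.replicate (c0 * f) 0)]
  rw [pv_c_fold f c0 rowg hlen c0 (le_refl _)]
  simp

-- the main loop of A produces the block-row expansion
theorem pv_main (g : List (List Int)) (f : Nat)
    (hpre : ∀ row ∈ g, (g.getD 0 []).length ≤ row.length) :
    ∀ (k : Nat), k ≤ g.length →
      (List.range k).foldl
        (fun out r => (List.range (g.getD 0 []).length).foldl
          (fun out c => (List.range f).foldl
            (fun out dr => (List.range f).foldl
              (fun out dc => out.set (r * f + dr)
                ((out.getD (r * f + dr) []).set (c * f + dc) ((g.getD r []).getD c 0))) out)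
            out) out)
        (List.replicate (g.length * f) (List.replicate ((g.getD 0 []).length * f) 0))
      = (g.take k).flatMap
          (fun row => List.replicate f (pvExp f (row.take (g.getD 0 []).length)))
        ++ List.replicate ((g.length - k) * f) (List.replicate ((g.getD 0 []).length * f) 0) := by
  intro k
  induction k with
  | zero => intro _; simp
  | succ k ih =>
      intro hk
      rw [List.range_succ, List.foldl_append, ih (by omega), List.foldl_cons, List.foldl_nil]
      have hkn : k < g.length := by omega
      have hsplit : (g.length - k) * f = f + (g.length - (k + 1)) * f := by
        have h1 : g.length - k = 1 + (g.length - (k + 1)) := by omega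
        rw [h1, Nat.add_mul, Nat.one_mul]
      rw [hsplit, List.replicate_add]
      have hprelen : ((g.take k).flatMap
          (fun row => List.replicate f (pvExp f (row.take (g.getD 0 []).length)))).length
          = k * f := by
        rw [pv_len_flatMap_repl, List.length_take, Nat.min_eq_left (by omega)]
      have hrowlen : (g.getD 0 []).length ≤ (g.getD k []).length := by
        apply hpre
        rw [List.getD_eq_getElem?_getD, List.getElem?_eq_getElem hkn]
        exact List.getElem_mem hkn
      rw [pv_block f (g.getD 0 []).length (g.getD k []) hrowlen _ _ (k * f) hprelen]
      have htake : g.take (k + 1) = g.take k ++ [g.getD k []] := by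
        rw [List.take_succ, List.getElem?_eq_getElem hkn]
        have : g.getD k [] = g[k] := by
          rw [List.getD_eq_getElem?_getD, List.getElem?_eq_getElem hkn]; rfl
        rw [this]; rfl
      rw [htake, List.flatMap_append]
      simp

-- conversion of the A port to the Nat-indexed model
theorem pv_A_eq (g : List (List Int)) (hg : g ≠ []) (f : Nat) :
    scale_grid g (f : Int)
    = (List.range g.length).foldl
        (fun out r => (List.range (g.getD 0 []).length).foldl
          (fun out c => (List.range f).foldl
            (fun out dr => (List.range f).foldl
              (fun out dc => out.set (r * f + dr)
                ((out.getD (r * f + dr) []).set (c * f + dc) ((g.getD r []).getD c 0))) out)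
            out) out)
        (List.replicate (g.length * f) (List.replicate ((g.getD 0 []).length * f) 0)) := by
  have h0 : ((0:Int) < (g.length : Int)) := by exact_mod_cast List.length_pos_iff.mpr hg
  unfold scale_grid grid_shape
  simp only [gt_iff_lt, if_pos h0, PySem.List.pyGetD_zero]
  simp only [PySem.List.pyRange_zero_natCast, ← Nat.cast_mul, ← Nat.cast_add,
    List.foldl_map, List.map_map, PySem.List.pyGetD_natCast, PySem.List.pySetD_natCast,
    List.map_const', List.length_range, Function.comp]
  congr 1
  simp [Function.comp_def]

-- conversion of the B port to the block-row expansion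
theorem pv_B_eq (g : List (List Int)) (hg : g ≠ []) (f : Nat) :
    scale_grid_alt g (f : Int)
    = g.flatMap (fun row => List.replicate f (pvExp f (row.take (g.getD 0 []).length))) := by
  unfold scale_grid_alt
  simp only [if_pos hg, PySem.List.pyGetD_zero]
  rw [PySem.List.foldl_append_eq_flatMap]
  rw [List.nil_append]
  have hbody : (fun (row : List Int) =>
      (PySem.List.pyRange 0 (f : Int) 1).map (fun _ =>
        (PySem.List.slice row none (some ((g.getD 0 []).length : Int))).flatMap (fun v =>
          (PySem.List.pyRange 0 (f : Int) 1).map (fun _ => v))))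
      = (fun (row : List Int) => List.replicate f (pvExp f (row.take (g.getD 0 []).length))) := by
    funext row
    rw [PySem.List.slice_to_natCast]
    have hrep : ∀ (v : Int), (PySem.List.pyRange 0 (f : Int) 1).map (fun _ => v)
        = List.replicate f v := by
      intro v
      rw [List.map_const']
      simp [PySem.List.length_pyRange_one]
    simp only [hrep, pvExp]
    rw [List.map_const']
    simp [PySem.List.length_pyRange_one]
  rw [hbody]

theorem pv_foldl_id {α β : Type} (L : List α) (init : β) :
    L.foldl (fun acc _ => acc) init = init := by
  induction L generalizing init with
  | nil => rfl
  | cons a t ih => rw [List.foldl_cons]; exact ih init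

theorem pv_nonpos (g : List (List Int)) (factor : Int) (hf : factor ≤ 0) :
    scale_grid g factor = scale_grid_alt g factor := by
  have h1 : (0:Int) ≤ (g.length : Int) := by positivity
  have hr0 : (g.length : Int) * factor ≤ 0 := mul_nonpos_of_nonneg_of_nonpos h1 hf
  simp only [scale_grid, scale_grid_alt, grid_shape,
    PySem.List.pyRange_one_eq_nil hf, PySem.List.pyRange_one_eq_nil hr0,
    List.map_nil, List.foldl_nil, List.append_nil]
  simp only [pv_foldl_id]

theorem pv_empty (factor : Int) : scale_grid [] factor = scale_grid_alt [] factor := by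
  simp [scale_grid, scale_grid_alt, grid_shape,
    PySem.List.pyRange_one_eq_nil (le_refl (0:Int))]

-- ===== VERDICT (by name: the statement is the Claim_ definition above) =====
theorem scale_grid_spec : Claim_equal_scale_grid := by
  intro g factor _ hpre
  unfold Spec_scale_grid
  rcases (by omega : factor ≤ 0 ∨ 0 < factor) with hf | hf
  · exact pv_nonpos g factor hf
  · rcases eq_or_ne g [] with rfl | hg
    · exact pv_empty factor
    · have hfeq : ((factor.toNat : Int)) = factor := Int.toNat_of_nonneg (le_of_lt hf)
      set f := factor.toNat with hfdef
      rw [← hfeq, pv_A_eq g hg f, pv_B_eq g hg f]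
      have hpre' : ∀ row ∈ g, (g.getD 0 []).length ≤ row.length := by
        intro row hrow
        have : g.getD 0 [] = g.headI := by cases g with | nil => simp at hg | cons a t => rfl
        rw [this]; exact hpre row hrow
      have := pv_main g f hpre' g.length (le_refl _)
      rw [this]
      simp
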